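-- pv_equiv track=rewrite | github.com/aerobinsonIV/git | get_game_title_list.py | parseOnePage
-- ===== SOURCE A (Python) =====
-- def parseOnePage(lines):
--     trigger_string = '<div class="item-name">'
--
--     titles = []
--
--     next_line_is_title = False
--
--     for line in lines:
--         if next_line_is_title:
--             titles.append(line.strip().replace("&#39;", "’").replace("&amp;", "&").replace("&#228;", "ä"))
--             next_line_is_title = False
--
--         if line.__contains__(trigger_string):
--             next_line_is_title = True
--     return titles
-- ===== SOURCE B (Python) =====
-- def parseOnePage(lines):
--     trigger_string = '<div class="item-name">'
--
--     def process(s):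
--         return s.strip().replace("&#39;", "\u2019").replace("&amp;", "&").replace("&#228;", "\u00e4")
--
--     lst = list(lines)
--     return [process(nxt) for prev, nxt in zip(lst, lst[1:]) if trigger_string in prev]
-- ===== Notes on version B (the rewrite author's own statement) =====
-- stated objective: alternative
-- what changed: Replaces the carried next_line_is_title flag with a stateless pass over adjacent (prev, next) pairs via zip, emitting the processed next line whenever the previous line contains the trigger.
import Mathlib
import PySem

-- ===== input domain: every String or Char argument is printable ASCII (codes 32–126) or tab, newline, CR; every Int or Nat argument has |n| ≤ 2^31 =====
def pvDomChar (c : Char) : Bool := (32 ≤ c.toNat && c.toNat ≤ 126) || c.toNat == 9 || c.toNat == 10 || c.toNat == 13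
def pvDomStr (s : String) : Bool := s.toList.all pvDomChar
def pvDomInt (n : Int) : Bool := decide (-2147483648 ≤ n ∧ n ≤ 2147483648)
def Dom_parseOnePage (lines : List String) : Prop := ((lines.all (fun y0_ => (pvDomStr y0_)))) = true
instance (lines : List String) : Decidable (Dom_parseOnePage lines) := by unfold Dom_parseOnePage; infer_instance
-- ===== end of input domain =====

-- B replaces A's carried next_line_is_title flag with a stateless pass over adjacent (prev, next) pairs (alternative decomposition, same cost).

-- shared trigger constant (the same literal in both Pythons)
def pvTrigger : String := "<div class=\"item-name\">"

-- line.strip().replace("&#39;", "’").replace("&amp;", "&").replace("&#228;", "ä")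
def pvProcess (s : String) : String :=
  PySem.Str.replace (PySem.Str.replace (PySem.Str.replace (PySem.Str.strip s) "&#39;" "’") "&amp;" "&") "&#228;" "ä"

-- ===== PORT A =====
def parseOnePage (lines : List String) : List String :=
  (lines.foldl
    (fun (st : List String × Bool) line =>
      let titles := if st.2 then st.1 ++ [pvProcess line] else st.1
      (titles, PySem.Str.isIn pvTrigger line))
    ([], false)).1

-- ===== PORT B =====
def parseOnePage_alt (lines : List String) : List String :=
  (lines.zip lines.tail).filterMap
    (fun p => if PySem.Str.isIn pvTrigger p.1 then some (pvProcess p.2) else none)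

-- ===== PRECONDITION & SPEC =====
def Spec_parseOnePage (lines : List String) (out : List String) : Prop := out = parseOnePage_alt lines
instance (lines : List String) (out : List String) : Decidable (Spec_parseOnePage lines out) := by unfold Spec_parseOnePage; infer_instance

-- ===== CLAIM (what is proved, stated in full; the proofs are below) =====
def Claim_equal_parseOnePage : Prop := ∀ (lines : List String), Dom_parseOnePage lines → Spec_parseOnePage lines (parseOnePage lines)

-- ===== LEMMAS AND PROOFS =====

-- what A's loop body appends from a given flag onwards
def pvCore (lines : List String) (flag : Bool) : List String :=
  match lines with
  | [] => []
  | l :: ls => (if flag then [pvProcess l] else []) ++ pvCore ls (PySem.Str.isIn pvTrigger l)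

lemma pvLoop (lines : List String) (acc : List String) (flag : Bool) :
    (lines.foldl
      (fun (st : List String × Bool) line =>
        let titles := if st.2 then st.1 ++ [pvProcess line] else st.1
        (titles, PySem.Str.isIn pvTrigger line))
      (acc, flag)).1 = acc ++ pvCore lines flag := by
  induction lines generalizing acc flag with
  | nil => simp [pvCore]
  | cons l ls ih =>
    simp only [List.foldl_cons, pvCore]
    rw [ih]
    cases flag <;> simp

lemma pvCore_eq (lines : List String) (flag : Bool) :
    pvCore lines flag =
      (if flag then (lines.head?.map pvProcess).toList else []) ++ parseOnePage_alt lines := by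
  induction lines generalizing flag with
  | nil => simp [pvCore, parseOnePage_alt]
  | cons l ls ih =>
    rw [pvCore, ih]
    cases ls with
    | nil => cases flag <;> simp [parseOnePage_alt]
    | cons l2 rest =>
      simp only [parseOnePage_alt, List.tail_cons, List.zip_cons_cons, List.filterMap_cons]
      cases flag <;> cases PySem.Str.isIn pvTrigger l <;> simp

-- ===== VERDICT (by name: the statement is the Claim_ definition above) =====
theorem parseOnePage_spec : Claim_equal_parseOnePage := by
  intro lines _
  show parseOnePage lines = parseOnePage_alt lines
  rw [parseOnePage, pvLoop, pvCore_eq]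
  simp
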